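-- pv_equiv track=rewrite | github.com/TFedir/order-and-chaos | classes/board.py | empty_line
-- ===== SOURCE A (Python) =====
-- def empty_line(line: list) -> bool:
--     """
--     Check if there are len(line) - 1 empty elements in line.
--     Expected that line is not empty
--     """
--     counter = 0
--     for i in range(len(line)):
--         if counter == (len(line) - 1) and line[i] == 0:
--             return True
--         if line[i] == 1:
--             counter = 0
--         else:
--             counter += 1
--     return False
-- ===== SOURCE B (Python) =====
-- def empty_line(line: list) -> bool:
--     """
--     Check if there are len(line) - 1 empty elements in line.
--     Expected that line is not empty
--     """
--     return len(line) > 0 and line[-1] == 0 and all(x != 1 for x in line[:-1])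
-- ===== Notes on version B (the rewrite author's own statement) =====
-- stated objective: simpler
-- what changed: Replaced the stateful run-length counter scan with a direct predicate: non-empty, last element equals 0, and no element of line[:-1] equals 1.
import Mathlib
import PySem

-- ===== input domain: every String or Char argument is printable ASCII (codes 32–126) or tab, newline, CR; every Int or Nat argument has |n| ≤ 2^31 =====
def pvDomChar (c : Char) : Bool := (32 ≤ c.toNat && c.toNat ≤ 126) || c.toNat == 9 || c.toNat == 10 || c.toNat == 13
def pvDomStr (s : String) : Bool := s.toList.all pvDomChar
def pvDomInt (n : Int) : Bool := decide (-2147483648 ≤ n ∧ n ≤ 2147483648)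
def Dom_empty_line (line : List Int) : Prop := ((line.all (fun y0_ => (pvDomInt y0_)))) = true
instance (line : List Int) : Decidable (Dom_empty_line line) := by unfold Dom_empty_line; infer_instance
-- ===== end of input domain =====

-- B replaces A's stateful run-length counter scan with a direct predicate (simpler, same O(n) cost).

-- ===== PORT A =====
-- the loop over range(len(line)) visits the elements in order, carrying `counter`
def emptyLineGo (n : Int) : List Int → Int → Bool
  | [], _ => false
  | x :: rest, counter =>
    if counter == n - 1 && x == 0 then true
    else if x == 1 then emptyLineGo n rest 0
    else emptyLineGo n rest (counter + 1)

def empty_line (line : List Int) : Bool := emptyLineGo (line.length : Int) line 0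

-- ===== PORT B =====
def empty_line_alt (line : List Int) : Bool :=
  decide (0 < line.length)
    && (PySem.List.pyGet? line (-1) == some 0)
    && (PySem.List.slice line none (some (-1))).all (fun x => x != 1)

-- ===== PRECONDITION & SPEC =====
def Spec_empty_line (line : List Int) (out : Bool) : Prop := out = empty_line_alt line
instance (line : List Int) (out : Bool) : Decidable (Spec_empty_line line out) := by unfold Spec_empty_line; infer_instance

-- ===== CLAIM (what is proved, stated in full; the proofs are below) =====
def Claim_equal_empty_line : Prop := ∀ (line : List Int), Dom_empty_line line → Spec_empty_line line (empty_line line)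

-- ===== LEMMAS AND PROOFS =====

-- loop invariant: with 0 ≤ c and c + l.length ≤ n, the loop returns true iff
-- c + l.length = n, the last element of l is 0 and no earlier element is 1
theorem emptyLineGo_spec (n : Int) (l : List Int) (c : Int)
    (h0 : 0 ≤ c) (h : c + l.length ≤ n) :
    emptyLineGo n l c =
      (decide (c + l.length = n) && (l.getLast? == some 0)
        && l.dropLast.all (fun x => x != 1)) := by
  induction l generalizing c with
  | nil => simp [emptyLineGo]
  | cons x rest ih =>
    simp only [emptyLineGo]
    by_cases hfire : c = n - 1 ∧ x = 0
    · obtain ⟨hc, hx⟩ := hfire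
      have hrest : rest = [] := by
        cases rest with
        | nil => rfl
        | cons y ys => exfalso; simp [List.length_cons] at h; omega
      subst hrest hc hx
      simp
    · have hfire' : (c == n - 1 && x == 0) = false := by
        simp only [Bool.and_eq_false_iff, beq_eq_false_iff_ne]
        by_cases h1 : c = n - 1
        · right; intro hx; exact hfire ⟨h1, hx⟩
        · left; exact h1
      rw [hfire']
      simp only [Bool.false_eq_true, if_false]
      by_cases hx1 : x = 1
      · subst hx1
        rw [if_pos (by decide)]
        have hr : (0:Int) + rest.length ≤ n := by
          have h' : c + (((1:Int) :: rest).length : Int) ≤ n := h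
          rw [List.length_cons] at h'; push_cast at h'; omega
        rw [ih 0 le_rfl hr]
        -- RHS for x = 1 must be false
        cases rest with
        | nil => simp
        | cons y ys =>
          have hR : ((1 :: y :: ys).dropLast.all (fun x => x != 1)) = false := by
            simp [List.dropLast]
          have hL : ((y :: ys).getLast? == some 0) = ((1 :: y :: ys).getLast? == some 0) := by
            rw [List.getLast?_cons_cons]
          rw [hR, hL]
          simp
          intro h1 _
          exfalso
          simp only [List.length_cons] at h
          push_cast at h
          omega
      · rw [if_neg (by simpa using hx1)]
        have hr : (c + 1) + rest.length ≤ n := by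
          have h' : c + ((x :: rest).length : Int) ≤ n := h
          rw [List.length_cons] at h'; push_cast at h'; omega
        rw [ih (c+1) (by omega) hr]
        cases rest with
        | nil =>
          simp only [List.length_nil, List.getLast?_nil,
            List.getLast?_singleton, List.dropLast, List.all_nil]
          have hne : ¬ (c + ([x]:List Int).length = n ∧ x = 0) := by
            intro ⟨hcn, hx0⟩
            exact hfire ⟨by simp at hcn; omega, hx0⟩
          by_cases hcn : c + 1 = n
          · have hx0 : x ≠ 0 := fun hx0 => hne ⟨by simp; omega, hx0⟩
            simp [hcn, hx0]
          · have : ¬ (c + (([x]:List Int).length : Int) = n) := by simp; omega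
            have h2 : ¬ ((c:Int) + 1 + 0 = n) := by omega
            simp
            exact fun h' => absurd h' hcn
        | cons y ys =>
          have hlen : c + 1 + ((y :: ys).length : Int) = c + ((x :: y :: ys).length : Int) := by
            simp [List.length_cons]; omega
          have hlast : (x :: y :: ys).getLast? = (y :: ys).getLast? := by
            simp [List.getLast?_cons_cons]
          have hdrop : (x :: y :: ys).dropLast = x :: (y :: ys).dropLast := by
            simp [List.dropLast]
          rw [hlast, hdrop]
          simp only [List.all_cons]
          have hx1' : (x != 1) = true := by simpa using hx1
          rw [hx1', Bool.true_and]
          congr 2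
          rw [← hlen]

theorem alt_eq (line : List Int) :
    empty_line_alt line =
      (decide ((0:Int) + line.length = line.length) && (line.getLast? == some 0)
        && line.dropLast.all (fun x => x != 1)) := by
  unfold empty_line_alt
  rw [PySem.List.pyGet?_neg_one, PySem.List.slice_to_neg_one]
  cases line with
  | nil => simp
  | cons x rest => simp

-- ===== VERDICT (by name: the statement is the Claim_ definition above) =====
theorem empty_line_spec : Claim_equal_empty_line := by
  intro line _
  show empty_line line = empty_line_alt line
  rw [empty_line, alt_eq,
    emptyLineGo_spec (line.length : Int) line 0 le_rfl (by simp)]
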